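-- pv_equiv track=rewrite | github.com/Veer14/recurrence-relations-generating-functions | main.py | simulate_inventory
-- ===== SOURCE A (Python) =====
-- def simulate_inventory(N, D0=5, I0=50):
--     D = [D0]
--     I = [I0]
--     for n in range(1, N + 1):
--         Dn = 2 * D[n-1] + 3
--         D.append(Dn)
--         In = I[n-1] - Dn + D[n-1]
--         I.append(In)
--     return D, I
-- ===== SOURCE B (Python) =====
-- def simulate_inventory(N, D0=5, I0=50):
--     # Build D alone by its recurrence, then derive I from the telescoped
--     # closed form I[n] = I0 + D0 - D[n]  (since I[n]-I[n-1] = D[n-1]-D[n]).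
--     D = [D0]
--     last = D0
--     for _ in range(N):
--         last = 2 * last + 3
--         D.append(last)
--     I = [I0 + D0 - d for d in D]
--     return D, I
-- ===== Notes on version B (the rewrite author's own statement) =====
-- stated objective: alternative
-- what changed: Replaces the single interleaved loop updating the coupled pair (D, I) by two uncoupled passes: one loop builds D from its own recurrence (tracking the last value instead of indexing), then I is produced by mapping the telescoped closed form I[n] = I0 + D0 - D[n] over D.
import Mathlib
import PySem

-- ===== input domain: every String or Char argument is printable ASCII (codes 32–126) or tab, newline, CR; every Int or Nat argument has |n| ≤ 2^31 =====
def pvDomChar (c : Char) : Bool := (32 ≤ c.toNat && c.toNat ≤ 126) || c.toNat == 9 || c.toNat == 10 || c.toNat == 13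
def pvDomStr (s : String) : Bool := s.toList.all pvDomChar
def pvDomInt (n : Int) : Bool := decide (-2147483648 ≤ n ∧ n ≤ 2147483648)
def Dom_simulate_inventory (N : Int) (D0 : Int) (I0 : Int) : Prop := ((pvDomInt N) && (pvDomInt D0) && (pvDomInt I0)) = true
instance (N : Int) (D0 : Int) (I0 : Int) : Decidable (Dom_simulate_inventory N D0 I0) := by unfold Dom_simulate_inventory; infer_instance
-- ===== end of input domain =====

-- B decouples the recurrences: it builds D by one pass, then maps the telescoped
-- closed form I[n] = I0 + D0 - D[n] over D (alternative decomposition, same cost).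


-- ===== PORT A =====
-- Literal port of A: one loop over range(1, N+1) updating the coupled pair (D, I).
-- The indices n-1 are always in range in Python (lists have length n there), so
-- `pyGetD … 0` never takes its default.
def simulate_inventory (N : Int) (D0 : Int) (I0 : Int) : List Int × List Int :=
  (PySem.List.pyRange 1 (N + 1) 1).foldl
    (fun (st : List Int × List Int) (n : Int) =>
      let Dn := 2 * PySem.List.pyGetD st.1 (n - 1) 0 + 3
      let D' := st.1 ++ [Dn]
      let In := PySem.List.pyGetD st.2 (n - 1) 0 - Dn + PySem.List.pyGetD st.1 (n - 1) 0
      (D', st.2 ++ [In]))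
    ([D0], [I0])

-- ===== PORT B =====
-- Literal port of Source B: build D alone (tracking `last`), then I = map of the
-- telescoped closed form over D.
def simulate_inventory_alt (N : Int) (D0 : Int) (I0 : Int) : List Int × List Int :=
  let p := (PySem.List.pyRange 0 N 1).foldl
    (fun (st : List Int × Int) (_ : Int) =>
      let last := 2 * st.2 + 3
      (st.1 ++ [last], last))
    ([D0], D0)
  (p.1, p.1.map (fun d => I0 + D0 - d))

-- ===== PRECONDITION & SPEC =====
def Spec_simulate_inventory (N : Int) (D0 : Int) (I0 : Int) (out : List Int × List Int) : Prop := out = simulate_inventory_alt N D0 I0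
instance (N : Int) (D0 : Int) (I0 : Int) (out : List Int × List Int) : Decidable (Spec_simulate_inventory N D0 I0 out) := by unfold Spec_simulate_inventory; infer_instance

-- ===== CLAIM (what is proved, stated in full; the proofs are below) =====
def Claim_equal_simulate_inventory : Prop := ∀ (N : Int) (D0 : Int) (I0 : Int), Dom_simulate_inventory N D0 I0 → Spec_simulate_inventory N D0 I0 (simulate_inventory N D0 I0)

-- ===== LEMMAS AND PROOFS =====

-- dv k = D[k]; Dl k = the list D after k loop iterations.
def dv (D0 : Int) : Nat → Int
  | 0 => D0
  | k + 1 => 2 * dv D0 k + 3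

def Dl (D0 : Int) : Nat → List Int
  | 0 => [D0]
  | k + 1 => Dl D0 k ++ [dv D0 (k + 1)]

theorem Dl_length (D0 : Int) (n : Nat) : (Dl D0 n).length = n + 1 := by
  induction n with
  | zero => rfl
  | succ k ih => simp [Dl, ih]

theorem Dl_getD (D0 : Int) (n : Nat) : (Dl D0 n).getD n 0 = dv D0 n := by
  induction n with
  | zero => rfl
  | succ k ih =>
    have h : (Dl D0 k).length = k + 1 := Dl_length D0 k
    simp [Dl, List.getD, h]

theorem Dl_pyGetD (D0 : Int) (n : Nat) :
    PySem.List.pyGetD (Dl D0 n) (n : Int) 0 = dv D0 n := by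
  rw [PySem.List.pyGetD_natCast]; exact Dl_getD D0 n

-- B's fold after n iterations.
theorem bfold_spec (D0 : Int) (n : Nat) :
    (PySem.List.pyRange 0 (n : Int) 1).foldl
      (fun (st : List Int × Int) (_ : Int) =>
        let last := 2 * st.2 + 3
        (st.1 ++ [last], last))
      ([D0], D0) = (Dl D0 n, dv D0 n) := by
  induction n with
  | zero => simp [PySem.List.pyRange_one_eq_nil, Dl, dv]
  | succ k ih =>
    have hsplit : PySem.List.pyRange 0 ((k : Int) + 1) 1
        = PySem.List.pyRange 0 (k : Int) 1 ++ [(k : Int)] :=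
      PySem.List.pyRange_one_succ_right (by exact_mod_cast Nat.zero_le k)
    push_cast
    rw [hsplit, List.foldl_append, ih]
    simp [Dl, dv]

-- A's fold after n iterations equals (Dl n, map of the closed form over Dl n).
theorem afold_spec (D0 I0 : Int) (n : Nat) :
    (PySem.List.pyRange 1 ((n : Int) + 1) 1).foldl
      (fun (st : List Int × List Int) (n : Int) =>
        let Dn := 2 * PySem.List.pyGetD st.1 (n - 1) 0 + 3
        let D' := st.1 ++ [Dn]
        let In := PySem.List.pyGetD st.2 (n - 1) 0 - Dn + PySem.List.pyGetD st.1 (n - 1) 0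
        (D', st.2 ++ [In]))
      ([D0], [I0]) = (Dl D0 n, (Dl D0 n).map (fun d => I0 + D0 - d)) := by
  induction n with
  | zero => simp [PySem.List.pyRange_one_eq_nil, Dl]
  | succ k ih =>
    have hsplit : PySem.List.pyRange 1 (((k : Int) + 1) + 1) 1
        = PySem.List.pyRange 1 ((k : Int) + 1) 1 ++ [(k : Int) + 1] :=
      PySem.List.pyRange_one_succ_right (by omega)
    push_cast
    rw [hsplit, List.foldl_append, ih]
    have hidx : ((k : Int) + 1 - 1) = (k : Int) := by ring
    have hD : PySem.List.pyGetD (Dl D0 k) ((k : Int) + 1 - 1) 0 = dv D0 k := by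
      rw [hidx]; exact Dl_pyGetD D0 k
    have hI : PySem.List.pyGetD ((Dl D0 k).map (fun d => I0 + D0 - d)) ((k : Int) + 1 - 1) 0
        = I0 + D0 - dv D0 k := by
      rw [hidx, PySem.List.pyGetD_natCast]
      have h : (Dl D0 k).length = k + 1 := Dl_length D0 k
      have hk : k < ((Dl D0 k).map (fun d => I0 + D0 - d)).length := by
        simp [h]
      rw [List.getD_eq_getElem _ _ hk, List.getElem_map]
      have := Dl_getD D0 k
      rw [List.getD_eq_getElem _ _ (by omega : k < (Dl D0 k).length)] at this
      rw [this]
    simp only [List.foldl_cons, List.foldl_nil, hD, hI]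
    simp only [Dl, dv, List.map_append, List.map_cons, List.map_nil, Prod.mk.injEq]
    refine ⟨trivial, ?_⟩
    congr 2
    ring

-- ===== VERDICT (by name: the statement is the Claim_ definition above) =====
theorem simulate_inventory_spec : Claim_equal_simulate_inventory := by
  intro N D0 I0 _
  unfold Spec_simulate_inventory simulate_inventory simulate_inventory_alt
  rcases le_or_gt N 0 with hN | hN
  · rw [PySem.List.pyRange_one_eq_nil (by omega : N + 1 ≤ 1),
        PySem.List.pyRange_one_eq_nil (hN : N ≤ 0)]
    simp
  · have hNn : N = ((N.toNat : Int)) := by omega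
    rw [hNn, afold_spec, bfold_spec]
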